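-- pv_equiv track=rewrite | github.com/MargaritaSyrtl/TSPD-OSRM | TSP/test_2.py | local_search_l1
-- ===== SOURCE A (Python) =====
-- def local_search_l1(chromosome):
--     """
--     Choose three consecutive truck nodes and convert the middle one to a drone node.
--     """
--     # if depo and then 2 nodes are truck nodes, but we don't consider depo ??
--     chrom = chromosome[:]
--     n = len(chrom)
--     # find three consecutive truck nodes
--     for i in range(n - 2):
--         if chrom[i] > 0 and chrom[i+1] > 0 and chrom[i+2] > 0:
--             chrom[i+1] = -chrom[i+1]  # convert the middle one to a drone node
--             return chrom
--     return chrom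
-- ===== SOURCE B (Python) =====
-- def local_search_l1(chromosome):
--     """Run-segmentation rewrite: split the chromosome into maximal runs of equal
--     positivity class, negate the second element of the first positive run of
--     length >= 3, and flatten the runs back into one list."""
--     # Stage 1: segment into maximal runs of equal positivity class.
--     runs = []
--     cur = []
--     for x in chromosome:
--         if cur and ((cur[0] > 0) == (x > 0)):
--             cur.append(x)
--         else:
--             if cur:
--                 runs.append(cur)
--             cur = [x]
--     if cur:
--         runs.append(cur)
--     # Stage 2: fix the first positive run of length >= 3, then flatten.
--     out = []
--     done = False
--     for run in runs:
--         if not done and run[0] > 0 and len(run) >= 3: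
--             run = [run[0], -run[1]] + run[2:]
--             done = True
--         out.extend(run)
--     return out
-- ===== Notes on version B (the rewrite author's own statement) =====
-- stated objective: alternative
-- what changed: B segments the chromosome into maximal runs of equal positivity class, negates the second element of the first positive run of length >= 3 and flattens, instead of A's scan of overlapping index triples on a copy.
import Mathlib
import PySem

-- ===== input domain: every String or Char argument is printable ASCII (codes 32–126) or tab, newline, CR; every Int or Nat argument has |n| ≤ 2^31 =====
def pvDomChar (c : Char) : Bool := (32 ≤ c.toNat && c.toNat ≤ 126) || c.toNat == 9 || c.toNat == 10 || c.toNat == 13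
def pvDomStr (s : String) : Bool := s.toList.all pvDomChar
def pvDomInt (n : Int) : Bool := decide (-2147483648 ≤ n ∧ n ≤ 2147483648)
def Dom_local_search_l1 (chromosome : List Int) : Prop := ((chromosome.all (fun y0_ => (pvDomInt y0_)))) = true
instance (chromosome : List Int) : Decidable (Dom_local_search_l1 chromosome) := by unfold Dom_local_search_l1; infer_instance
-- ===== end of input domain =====

-- B replaces A's scan of overlapping index triples by a two-stage run-segmentation:
-- group into maximal runs of equal positivity, fix the first positive run of length ≥ 3,
-- flatten (objective: alternative).

-- ===== PORT A =====
-- A's `for i in range(n-2)` loop with early return; indices i, i+1, i+2 are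
-- always in range (i < n-2), so List.getD / List.set are exact for chrom[i] / chrom[i+1]=… .
def pvALoop (chrom : List Int) (i stop : Nat) : List Int :=
  if _h : i < stop then
    if chrom.getD i 0 > 0 ∧ chrom.getD (i+1) 0 > 0 ∧ chrom.getD (i+2) 0 > 0 then
      chrom.set (i+1) (-(chrom.getD (i+1) 0))
    else
      pvALoop chrom (i+1) stop
  else chrom
termination_by stop - i

def local_search_l1 (chromosome : List Int) : List Int :=
  pvALoop chromosome 0 (chromosome.length - 2)

-- ===== PORT B =====
-- Positivity class of an element (Python's `x > 0` used for grouping).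
def pvSignB (x : Int) : Bool := decide (0 < x)

-- Stage-1 loop body: state = (finished runs, current run); `cur[0]` is read only when
-- cur ≠ [] (Python's `if cur and …`), so headD is exact.
def pvStepB (st : List (List Int) × List Int) (x : Int) : List (List Int) × List Int :=
  if st.2 ≠ [] ∧ pvSignB (st.2.headD 0) = pvSignB x then
    (st.1, st.2 ++ [x])
  else
    ((if st.2 ≠ [] then st.1 ++ [st.2] else st.1), [x])

def pvRunsB (c : List Int) : List (List Int) :=
  let st := c.foldl pvStepB ([], [])
  if st.2 ≠ [] then st.1 ++ [st.2] else st.1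

-- Stage-2 loop body: state = (out, done); run[0], run[1] are read only when
-- 3 ≤ run.length, so headD / getD are exact.
def pvEmitB (st : List Int × Bool) (run : List Int) : List Int × Bool :=
  if st.2 = false ∧ run.headD 0 > 0 ∧ 3 ≤ run.length then
    (st.1 ++ [run.headD 0, -(run.getD 1 0)] ++ run.drop 2, true)
  else (st.1 ++ run, st.2)

def local_search_l1_alt (chromosome : List Int) : List Int :=
  ((pvRunsB chromosome).foldl pvEmitB ([], false)).1

-- ===== PRECONDITION & SPEC =====
def Spec_local_search_l1 (chromosome : List Int) (out : List Int) : Prop := out = local_search_l1_alt chromosome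
instance (chromosome : List Int) (out : List Int) : Decidable (Spec_local_search_l1 chromosome out) := by unfold Spec_local_search_l1; infer_instance

-- ===== CLAIM (what is proved, stated in full; the proofs are below) =====
def Claim_equal_local_search_l1 : Prop := ∀ (chromosome : List Int), Dom_local_search_l1 chromosome → Spec_local_search_l1 chromosome (local_search_l1 chromosome)

-- ===== LEMMAS AND PROOFS =====

-- Common reference function: structural recursion doing the same job.
def pvRecFun : List Int → List Int
  | a :: b :: c :: t => if 0 < a ∧ 0 < b ∧ 0 < c then a :: -b :: c :: t else a :: pvRecFun (b :: c :: t)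
  | xs => xs

theorem pvRecFun_short (xs : List Int) (h : xs.length ≤ 2) : pvRecFun xs = xs := by
  match xs with
  | [] => rfl
  | [_] => rfl
  | [_, _] => rfl
  | _ :: _ :: _ :: _ => simp at h

-- ---- A = pvRecFun ----
theorem pvALoop_take_drop (c : List Int) :
    ∀ i, pvALoop c i (c.length - 2) = c.take i ++ pvRecFun (c.drop i) := by
  intro i
  induction' hd : c.length - i with d ih generalizing i
  · rw [pvALoop, dif_neg (by omega)]
    rw [pvRecFun_short _ (by simp; omega), List.take_append_drop]
  · by_cases hi : i < c.length - 2
    · have h2 : i + 2 < c.length := by omega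
      have h1 : i + 1 < c.length := by omega
      have h0 : i < c.length := by omega
      have eD : c.drop i = c.getD i 0 :: c.getD (i+1) 0 :: c.getD (i+2) 0 :: c.drop (i+3) := by
        rw [List.drop_eq_getElem_cons h0, List.drop_eq_getElem_cons h1, List.drop_eq_getElem_cons h2,
            ← List.getD_eq_getElem c 0 h0, ← List.getD_eq_getElem c 0 h1, ← List.getD_eq_getElem c 0 h2]
      have eD2 : c.drop (i+1) = c.getD (i+1) 0 :: c.getD (i+2) 0 :: c.drop (i+3) := by
        rw [List.drop_eq_getElem_cons h1, List.drop_eq_getElem_cons h2,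
            ← List.getD_eq_getElem c 0 h1, ← List.getD_eq_getElem c 0 h2]
      have eD3 : c.drop (i+2) = c.getD (i+2) 0 :: c.drop (i+3) := by
        rw [List.drop_eq_getElem_cons h2, ← List.getD_eq_getElem c 0 h2]
      have eT : c.take (i+1) = c.take i ++ [c.getD i 0] := by
        rw [List.take_add_one]
        simp [List.getElem?_eq_getElem h0]
      rw [pvALoop, dif_pos hi]
      by_cases hc : c.getD i 0 > 0 ∧ c.getD (i+1) 0 > 0 ∧ c.getD (i+2) 0 > 0
      · rw [if_pos hc]
        rw [eD, pvRecFun, if_pos ⟨hc.1, hc.2.1, hc.2.2⟩]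
        rw [List.set_eq_take_append_cons_drop, if_pos h1, eT, eD3]
        simp
      · rw [if_neg hc]
        rw [ih (i+1) (by omega), eD, pvRecFun, if_neg hc, eD2, eT]
        simp
    · rw [pvALoop, dif_neg hi]
      rw [pvRecFun_short _ (by simp; omega), List.take_append_drop]

theorem pvA_eq_rec (c : List Int) : local_search_l1 c = pvRecFun c := by
  have := pvALoop_take_drop c 0
  simpa [local_search_l1] using this

-- ---- B = pvRecFun ----
-- Reference segmentation, built by cons.
def pvMerge (x : Int) (S : List (List Int)) : List (List Int) :=
  match S with
  | [] => [[x]]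
  | r :: rs => if pvSignB (r.headD 0) = pvSignB x then (x :: r) :: rs else [x] :: r :: rs

def pvSegR : List Int → List (List Int)
  | [] => []
  | x :: xs => pvMerge x (pvSegR xs)

def pvGlue (cur : List Int) (S : List (List Int)) : List (List Int) :=
  match S with
  | [] => [cur]
  | r :: rs => if pvSignB (r.headD 0) = pvSignB (cur.headD 0) then (cur ++ r) :: rs else cur :: r :: rs

theorem pvGlue_single (x : Int) (S : List (List Int)) : pvGlue [x] S = pvMerge x S := by
  cases S <;> simp [pvGlue, pvMerge]

theorem pvHeadD_append (cur : List Int) (x : Int) (hc : cur ≠ []) :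
    (cur ++ [x]).headD 0 = cur.headD 0 := by
  cases cur with
  | nil => exact absurd rfl hc
  | cons a t => simp

theorem pvGlue_merge_same (cur : List Int) (x : Int) (S : List (List Int))
    (hc : cur ≠ []) (hs : pvSignB (cur.headD 0) = pvSignB x) :
    pvGlue cur (pvMerge x S) = pvGlue (cur ++ [x]) S := by
  cases S with
  | nil =>
    simp only [pvMerge, pvGlue, List.headD_cons]
    rw [if_pos hs.symm]
  | cons r rs =>
    by_cases c1 : pvSignB (r.headD 0) = pvSignB x
    · rw [pvMerge, if_pos c1]
      rw [pvGlue, pvGlue, pvHeadD_append cur x hc]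
      simp only [List.headD_cons]
      rw [if_pos (by rw [hs]), if_pos (by rw [c1, hs])]
      simp
    · rw [pvMerge, if_neg c1]
      rw [pvGlue, pvGlue, pvHeadD_append cur x hc]
      simp only [List.headD_cons]
      rw [if_pos (by rw [hs]), if_neg (by rw [hs]; exact c1)]

theorem pvGlue_merge_diff (cur : List Int) (x : Int) (S : List (List Int))
    (_hc : cur ≠ []) (hs : pvSignB (cur.headD 0) ≠ pvSignB x) :
    pvGlue cur (pvMerge x S) = cur :: pvMerge x S := by
  cases S with
  | nil =>
    rw [pvMerge, pvGlue]
    rw [if_neg (by simp only [List.headD_cons]; exact fun h => hs h.symm)]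
  | cons r rs =>
    by_cases c1 : pvSignB (r.headD 0) = pvSignB x
    · rw [pvMerge, if_pos c1, pvGlue]
      rw [if_neg (by simp only [List.headD_cons]; exact fun h => hs h.symm)]
    · rw [pvMerge, if_neg c1, pvGlue]
      rw [if_neg (by simp only [List.headD_cons]; exact fun h => hs h.symm)]

theorem pvFoldStep (xs : List Int) : ∀ (runs : List (List Int)) (cur : List Int), cur ≠ [] →
    (let st := xs.foldl pvStepB (runs, cur);
     if st.2 ≠ [] then st.1 ++ [st.2] else st.1) = runs ++ pvGlue cur (pvSegR xs) := by
  induction xs with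
  | nil =>
    intro runs cur hc
    simp only [List.foldl_nil, if_pos hc, pvSegR, pvGlue]
  | cons x xs ih =>
    intro runs cur hc
    simp only [List.foldl_cons]
    by_cases hs : pvSignB (cur.headD 0) = pvSignB x
    · rw [show pvStepB (runs, cur) x = (runs, cur ++ [x]) by rw [pvStepB, if_pos ⟨hc, hs⟩]]
      rw [ih runs (cur ++ [x]) (by simp)]
      rw [show pvSegR (x :: xs) = pvMerge x (pvSegR xs) from rfl,
          pvGlue_merge_same cur x (pvSegR xs) hc hs]
    · rw [show pvStepB (runs, cur) x = (runs ++ [cur], [x]) by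
        rw [pvStepB, if_neg (by rintro ⟨_, h⟩; exact hs h), if_pos hc]]
      rw [ih (runs ++ [cur]) [x] (by simp)]
      rw [show pvSegR (x :: xs) = pvMerge x (pvSegR xs) from rfl,
          pvGlue_merge_diff cur x (pvSegR xs) hc hs, pvGlue_single]
      simp

theorem pvRunsB_eq_seg (c : List Int) : pvRunsB c = pvSegR c := by
  cases c with
  | nil => rfl
  | cons x xs =>
    unfold pvRunsB
    simp only [List.foldl_cons]
    rw [show pvStepB ([], []) x = ([], [x]) by rw [pvStepB]; simp]
    have := pvFoldStep xs [] [x] (by simp)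
    simp only at this
    rw [this, pvGlue_single]
    rfl

theorem pvMerge_flatten (x : Int) (S : List (List Int)) :
    (pvMerge x S).flatten = x :: S.flatten := by
  cases S with
  | nil => simp [pvMerge]
  | cons r rs => rw [pvMerge]; split_ifs <;> simp

theorem pvSeg_flatten (c : List Int) : (pvSegR c).flatten = c := by
  induction c with
  | nil => rfl
  | cons x xs ih => rw [pvSegR, pvMerge_flatten, ih]

-- validity of the segmentation
def pvValid : List (List Int) → Prop
  | [] => True
  | r :: rs => r ≠ [] ∧ (∀ y ∈ r, pvSignB y = pvSignB (r.headD 0)) ∧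
      (rs = [] ∨ pvSignB ((rs.headD []).headD 0) ≠ pvSignB (r.headD 0)) ∧ pvValid rs

theorem pvMerge_valid (x : Int) (S : List (List Int)) (h : pvValid S) :
    pvValid (pvMerge x S) := by
  cases S with
  | nil => simp [pvMerge, pvValid]
  | cons r rs =>
    obtain ⟨hne, hunif, halt, hrs⟩ := h
    by_cases c1 : pvSignB (r.headD 0) = pvSignB x
    · rw [pvMerge, if_pos c1]
      refine ⟨by simp, ?_, ?_, hrs⟩
      · intro y hy
        simp only [List.headD_cons]
        rcases List.mem_cons.1 hy with h | h
        · rw [h]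
        · rw [hunif y h, c1]
      · rcases halt with h | h
        · exact Or.inl h
        · exact Or.inr (by simp only [List.headD_cons]; rw [← c1]; exact h)
    · rw [pvMerge, if_neg c1]
      refine ⟨by simp, by simp, Or.inr ?_, hne, hunif, halt, hrs⟩
      simp only [List.headD_cons]
      exact c1

theorem pvSeg_valid (c : List Int) : pvValid (pvSegR c) := by
  induction c with
  | nil => trivial
  | cons x xs ih => exact pvMerge_valid x (pvSegR xs) ih

theorem pvRecFun_cons_of_nonpos (y : Int) (z : List Int) (h : ¬ 0 < y) :
    pvRecFun (y :: z) = y :: pvRecFun z := by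
  match z with
  | [] => rfl
  | [_] => rfl
  | b :: c :: t => rw [pvRecFun, if_neg (by tauto)]

theorem pvRecFun_cons_of_next (y : Int) (z : List Int)
    (h : ¬ 0 < z.headD 0 ∨ ¬ 0 < z.getD 1 0) :
    pvRecFun (y :: z) = y :: pvRecFun z := by
  match z with
  | [] => rfl
  | [_] => rfl
  | b :: c :: t =>
    rw [pvRecFun, if_neg]
    simp [List.headD, List.getD] at h
    omega

theorem pvEmit_done (segs : List (List Int)) : ∀ out,
    segs.foldl pvEmitB (out, true) = (out ++ segs.flatten, true) := by
  induction segs with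
  | nil => intro out; simp
  | cons r rs ih =>
    intro out
    simp only [List.foldl_cons]
    rw [show pvEmitB (out, true) r = (out ++ r, true) by rw [pvEmitB]; simp]
    rw [ih (out ++ r)]
    simp

theorem pvRecFun_append_nonpos (r : List Int) (t : List Int)
    (h : ∀ y ∈ r, ¬ 0 < y) : pvRecFun (r ++ t) = r ++ pvRecFun t := by
  induction r with
  | nil => simp
  | cons a r' ih =>
    rw [List.cons_append, pvRecFun_cons_of_nonpos a _ (h a (by simp)),
        ih (fun y hy => h y (by simp [hy]))]
    rfl

theorem pvEmit_main (segs : List (List Int)) : ∀ out, pvValid segs →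
    (segs.foldl pvEmitB (out, false)).1 = out ++ pvRecFun segs.flatten := by
  induction segs with
  | nil => intro out _; simp [pvRecFun]
  | cons r rs ih =>
    intro out hv
    obtain ⟨hne, hunif, halt, hrs⟩ := hv
    simp only [List.foldl_cons]
    by_cases hcond : r.headD 0 > 0 ∧ 3 ≤ r.length
    · rw [show pvEmitB (out, false) r
            = (out ++ [r.headD 0, -(r.getD 1 0)] ++ r.drop 2, true) by
          rw [pvEmitB, if_pos ⟨rfl, hcond.1, hcond.2⟩]]
      rw [pvEmit_done rs]
      match r, hcond with
      | a :: b :: c2 :: t, hcond =>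
        simp only [List.headD_cons] at hcond hunif
        have hb : 0 < b := by
          have := hunif b (by simp)
          simp only [pvSignB, decide_eq_decide] at this
          exact this.2 hcond.1
        have hc2 : 0 < c2 := by
          have := hunif c2 (by simp)
          simp only [pvSignB, decide_eq_decide] at this
          exact this.2 hcond.1
        simp only [List.flatten_cons, List.cons_append, pvRecFun,
          if_pos (⟨hcond.1, hb, hc2⟩ : 0 < a ∧ 0 < b ∧ 0 < c2)]
        simp [List.getD]
      | [], hcond => simp at hcond
      | [_], hcond => simp at hcond
      | [_, _], hcond => simp at hcond
    · rw [show pvEmitB (out, false) r = (out ++ r, false) by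
          rw [pvEmitB, if_neg (by rintro ⟨_, h1, h2⟩; exact hcond ⟨h1, h2⟩)]]
      rw [ih (out ++ r) hrs]
      have key : pvRecFun (r ++ rs.flatten) = r ++ pvRecFun rs.flatten := by
        by_cases hg : 0 < r.headD 0
        · -- short positive run (length ≤ 2), next element non-positive
          have hlen : r.length < 3 := by
            by_contra h
            exact hcond ⟨hg, by omega⟩
          have hF : ¬ 0 < (rs.flatten).headD 0 := by
            rcases halt with h | h
            · subst h; simp
            · cases rs with
              | nil => simp
              | cons s rs' =>
                have hsne : s ≠ [] := hrs.1
                have hhead : (List.flatten (s :: rs')).headD 0 = s.headD 0 := by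
                  match s, hsne with
                  | y :: s', _ => simp
                rw [hhead]
                simp only [List.headD_cons] at h
                intro hpos
                apply h
                simp only [pvSignB]
                rw [decide_eq_decide]
                exact ⟨fun _ => hg, fun _ => hpos⟩
          match r, hne, hlen with
          | [], hne2, _ => exact absurd rfl hne2
          | a :: b :: c2 :: t, _, hlen2 => simp at hlen2; omega
          | [a], _, _ =>
            rw [List.cons_append, List.nil_append,
                pvRecFun_cons_of_next a _ (Or.inl hF)]
            simp
          | [a, b], _, _ =>
            have h2 : ¬ 0 < (b :: rs.flatten).getD 1 0 := by
              rw [List.getD_cons_succ]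
              cases h' : rs.flatten with
              | nil => simp [List.getD]
              | cons u t => rw [h'] at hF; simpa [List.getD] using hF
            rw [List.cons_append, List.cons_append, List.nil_append,
                pvRecFun_cons_of_next a _ (Or.inr h2),
                pvRecFun_cons_of_next b _ (Or.inl hF)]
            simp
        · -- non-positive run
          apply pvRecFun_append_nonpos
          intro y hy
          have := hunif y hy
          simp only [pvSignB, decide_eq_decide] at this
          intro hpos
          exact hg (this.1 hpos)
      simp [key]

theorem pvB_eq_rec (c : List Int) : local_search_l1_alt c = pvRecFun c := by
  unfold local_search_l1_alt
  rw [pvRunsB_eq_seg, pvEmit_main _ [] (pvSeg_valid c), pvSeg_flatten]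
  simp

-- ===== VERDICT (by name: the statement is the Claim_ definition above) =====
theorem local_search_l1_spec : Claim_equal_local_search_l1 := by
  intro c _
  unfold Spec_local_search_l1
  rw [pvA_eq_rec, pvB_eq_rec]
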